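-- pv_equiv track=rewrite | github.com/zstankow/anomaly_detection | extract_data.py | format_title_component
-- ===== SOURCE A (Python) =====
-- def format_title_component(component):
--     formatted_component = ""
--     previous_char_was_space = True
--
--     for char in component:
--         if char.isspace():
--             previous_char_was_space = True
--         elif previous_char_was_space:
--             formatted_component += char.upper()
--             previous_char_was_space = False
--         else:
--             formatted_component += char
--     return formatted_component
-- ===== SOURCE B (Python) =====
-- def format_title_component(component):
--     return "".join(w[:1].upper() + w[1:] for w in component.split())
-- ===== Notes on version B (the rewrite author's own statement) =====
-- stated objective: simpler
-- what changed: Replaces the char-level previous_char_was_space state machine with repeated string concatenation by a word-level split() then capitalize-first-char-and-join one-liner.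
import Mathlib
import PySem

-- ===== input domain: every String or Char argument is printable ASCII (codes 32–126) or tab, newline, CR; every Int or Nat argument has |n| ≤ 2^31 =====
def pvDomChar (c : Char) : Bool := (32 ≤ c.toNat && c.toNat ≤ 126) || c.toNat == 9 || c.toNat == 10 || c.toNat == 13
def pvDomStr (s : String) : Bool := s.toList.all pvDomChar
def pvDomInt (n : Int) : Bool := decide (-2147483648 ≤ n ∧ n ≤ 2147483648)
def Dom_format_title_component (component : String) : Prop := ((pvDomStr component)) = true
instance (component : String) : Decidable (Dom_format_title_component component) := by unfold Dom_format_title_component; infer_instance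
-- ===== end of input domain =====

-- B replaces A's char-level space-flag state machine with a word-level split() + capitalize-first + join (objective: simpler).


-- ===== PORT A =====
-- literal port of A: fold over the characters carrying (formatted_component, previous_char_was_space)
def format_title_component (component : String) : String :=
  let st := component.toList.foldl
    (fun (st : List Char × Bool) c =>
      if PySem.Chars.isspace c then (st.1, true)
      else if st.2 then (st.1 ++ [PySem.Chars.upperChar c], false)
      else (st.1 ++ [c], false))
    ([], true)
  String.mk st.1

-- ===== PORT B =====
-- literal port of B: "".join(w[:1].upper() + w[1:] for w in component.split())
def format_title_component_alt (component : String) : String :=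
  String.mk (PySem.Chars.join []
    ((PySem.Chars.split₀ component.toList).map
      (fun w => PySem.Chars.upper (PySem.List.slice w none (some 1)) ++ PySem.List.slice w (some 1) none)))

-- ===== PRECONDITION & SPEC =====
def Spec_format_title_component (component : String) (out : String) : Prop := out = format_title_component_alt component
instance (component : String) (out : String) : Decidable (Spec_format_title_component component out) := by unfold Spec_format_title_component; infer_instance

-- ===== CLAIM (what is proved, stated in full; the proofs are below) =====
def Claim_equal_format_title_component : Prop := ∀ (component : String), Dom_format_title_component component → Spec_format_title_component component (format_title_component component)

-- ===== LEMMAS AND PROOFS =====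

-- the title-case state machine, as a structural recursion (proof-only helper)
def pvMachine : List Char → Bool → List Char
  | [], _ => []
  | c :: cs, flag =>
    if PySem.Chars.isspace c then pvMachine cs true
    else if flag then PySem.Chars.upperChar c :: pvMachine cs false
    else c :: pvMachine cs false

-- capitalize the first character (proof-only helper)
def pvCap : List Char → List Char
  | [] => []
  | c :: cs => PySem.Chars.upperChar c :: cs

theorem pvCap_eq_slices (w : List Char) :
    PySem.Chars.upper (PySem.List.slice w none (some 1)) ++ PySem.List.slice w (some 1) none
      = pvCap w := by
  cases w with
  | nil => rfl
  | cons c cs =>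
    simp [PySem.List.slice, PySem.Chars.upper, pvCap]

theorem foldl_fst (cs : List Char) (acc : List Char) (flag : Bool) :
    (cs.foldl
      (fun (st : List Char × Bool) c =>
        if PySem.Chars.isspace c then (st.1, true)
        else if st.2 then (st.1 ++ [PySem.Chars.upperChar c], false)
        else (st.1 ++ [c], false))
      (acc, flag)).1 = acc ++ pvMachine cs flag := by
  induction cs generalizing acc flag with
  | nil => simp [pvMachine]
  | cons c cs ih =>
    by_cases hs : PySem.Chars.isspace c
    · simp [List.foldl_cons, hs, pvMachine, ih]
    · cases flag with
      | true => simp [List.foldl_cons, hs, pvMachine, ih]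
      | false => simp [List.foldl_cons, hs, pvMachine, ih]

theorem pvCap_append_mid (l : List Char) (x : Char) (t : List Char) :
    pvCap (l ++ x :: t) = pvCap (l ++ [x]) ++ t := by
  cases l with
  | nil => simp [pvCap]
  | cons y ys => simp [pvCap]

theorem split_cap (cs cur : List Char) (acc : List (List Char)) :
    ((PySem.Chars.split₀.go cs cur acc).map pvCap).flatten
      = (acc.reverse.map pvCap).flatten ++ pvCap cur.reverse ++ pvMachine cs cur.isEmpty := by
  induction cs generalizing cur acc with
  | nil =>
    cases cur with
    | nil => simp [PySem.Chars.split₀.go, pvMachine, pvCap]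
    | cons c cs' => simp [PySem.Chars.split₀.go, pvMachine, pvCap]
  | cons c cs ih =>
    by_cases hs : PySem.Chars.isspace c
    · cases cur with
      | nil =>
        rw [show PySem.Chars.split₀.go (c :: cs) [] acc
              = PySem.Chars.split₀.go cs [] acc by simp [PySem.Chars.split₀.go, hs]]
        simp [ih, pvMachine, hs, pvCap]
      | cons x xs =>
        rw [show PySem.Chars.split₀.go (c :: cs) (x :: xs) acc
              = PySem.Chars.split₀.go cs [] (((x :: xs).reverse) :: acc) by
            simp [PySem.Chars.split₀.go, hs]]
        simp [ih, pvMachine, hs, pvCap]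
    · rw [show PySem.Chars.split₀.go (c :: cs) cur acc
            = PySem.Chars.split₀.go cs (c :: cur) acc by simp [PySem.Chars.split₀.go, hs]]
      rw [ih]
      cases cur with
      | nil => simp [pvMachine, hs, pvCap]
      | cons x xs =>
        have hmid := pvCap_append_mid xs.reverse x [c]
        simp [pvMachine, hs, hmid]

theorem join_nil_flatten (l : List (List Char)) : PySem.Chars.join [] l = l.flatten := by
  induction l with
  | nil => rfl
  | cons w l ih =>
    cases l with
    | nil => simp [PySem.Chars.join, List.intercalate, List.flatten]
    | cons w' l' => simpa [PySem.Chars.join_cons_cons] using congrArg (w ++ ·) ih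

-- ===== VERDICT (by name: the statement is the Claim_ definition above) =====
theorem format_title_component_spec : Claim_equal_format_title_component := by
  intro component _
  show format_title_component component = format_title_component_alt component
  have h1 := foldl_fst component.toList [] true
  have h2 := split_cap component.toList [] []
  have hfun : (fun w => PySem.Chars.upper (PySem.List.slice w none (some 1))
        ++ PySem.List.slice w (some 1) none) = pvCap := funext pvCap_eq_slices
  simp only [List.nil_append] at h1
  simp only [List.reverse_nil, List.map_nil, List.flatten_nil, List.nil_append,
    List.isEmpty_nil, pvCap] at h2
  simp only [format_title_component, format_title_component_alt, h1, hfun,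
    join_nil_flatten, PySem.Chars.split₀, h2]
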